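-- pv_equiv track=rewrite | github.com/Contykpo/introduction-to-programming | Practica/Especificacion.py | caclular_fragmento_mas_largo2
-- ===== SOURCE A (Python) =====
-- from typing import List
--
-- def caclular_fragmento_mas_largo2 (texto:str) -> int:
--     fragmentos: List[str] = texto.split(";")
--     maxima_longitud_fragmento: int = len(fragmentos[0])
--     for fragmento in fragmentos:
--         fragmento += ";"
--         if len(fragmento) > maxima_longitud_fragmento:
--             maxima_longitud_fragmento = len(fragmento)
--     return maxima_longitud_fragmento
-- ===== SOURCE B (Python) =====
-- def caclular_fragmento_mas_largo2(texto: str) -> int: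
--     # single pass over the characters: running length of the current fragment
--     # and best completed fragment so far; no intermediate list of fragments
--     best = 0
--     cur = 0
--     for c in texto:
--         if c == ';':
--             best = max(best, cur)
--             cur = 0
--         else:
--             cur += 1
--     return max(best, cur) + 1
-- ===== Notes on version B (the rewrite author's own statement) =====
-- stated objective: alternative
-- what changed: B replaces split(';') plus a max-scan over the fragment list by a single character-level scan that maintains a running current-fragment length and a best-so-far counter, never materialising the fragments.
import Mathlib
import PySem

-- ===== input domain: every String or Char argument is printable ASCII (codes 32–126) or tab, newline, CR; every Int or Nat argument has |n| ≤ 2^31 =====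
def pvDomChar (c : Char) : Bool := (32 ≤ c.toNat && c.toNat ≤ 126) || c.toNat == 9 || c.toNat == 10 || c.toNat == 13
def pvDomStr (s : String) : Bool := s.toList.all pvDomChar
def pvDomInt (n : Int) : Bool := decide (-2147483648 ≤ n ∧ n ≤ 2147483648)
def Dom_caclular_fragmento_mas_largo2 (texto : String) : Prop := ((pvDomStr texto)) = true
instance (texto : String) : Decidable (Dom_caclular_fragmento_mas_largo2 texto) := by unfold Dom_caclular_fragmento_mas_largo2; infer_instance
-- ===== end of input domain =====

-- B replaces split(";") + a max pass over the fragment list by a single character scan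
-- keeping a running current-fragment length and a best-so-far counter (alternative decomposition, same cost).


-- ===== PORT A =====
def caclular_fragmento_mas_largo2 (texto : String) : Int :=
  let fragmentos : List (List Char) := PySem.Chars.splitOn texto.toList [';']
  -- str.split(";") always returns a nonempty list, so fragmentos[0] never raises;
  -- the .getD [] branch is unreachable
  let maxima_longitud_fragmento : Int := (((PySem.List.pyGet? fragmentos 0).getD []).length : Int)
  fragmentos.foldl (fun m fragmento =>
    let fragmento := fragmento ++ [';']
    if ((fragmento.length : Int)) > m then ((fragmento.length : Int)) else m)
    maxima_longitud_fragmento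

-- ===== PORT B =====
def caclular_fragmento_mas_largo2_alt (texto : String) : Int :=
  let p := texto.toList.foldl
    (fun (p : Int × Int) c => if c = ';' then (max p.1 p.2, 0) else (p.1, p.2 + 1)) (0, 0)
  max p.1 p.2 + 1

-- ===== PRECONDITION & SPEC =====
def Spec_caclular_fragmento_mas_largo2 (texto : String) (out : Int) : Prop := out = caclular_fragmento_mas_largo2_alt texto
instance (texto : String) (out : Int) : Decidable (Spec_caclular_fragmento_mas_largo2 texto out) := by unfold Spec_caclular_fragmento_mas_largo2; infer_instance

-- ===== CLAIM (what is proved, stated in full; the proofs are below) =====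
def Claim_equal_caclular_fragmento_mas_largo2 : Prop := ∀ (texto : String), Dom_caclular_fragmento_mas_largo2 texto → Spec_caclular_fragmento_mas_largo2 texto (caclular_fragmento_mas_largo2 texto)

-- ===== LEMMAS AND PROOFS =====

/-- Prepend a prefix onto the first fragment (proof-side helper). -/
def preHead (p : List Char) : List (List Char) → List (List Char)
  | [] => [p]
  | f :: fs => (p ++ f) :: fs

/-- Structural model of `split(";")`. -/
def frags : List Char → List (List Char)
  | [] => [[]]
  | c :: r => if c = ';' then [] :: frags r else preHead [c] (frags r)

theorem preHead_ne_nil (p : List Char) (fs : List (List Char)) : preHead p fs ≠ [] := by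
  cases fs <;> simp [preHead]

theorem frags_ne_nil (cs : List Char) : frags cs ≠ [] := by
  induction cs with
  | nil => simp [frags]
  | cons c r ih =>
    simp only [frags]
    split
    · simp
    · exact preHead_ne_nil _ _

theorem preHead_nil (fs : List (List Char)) (h : fs ≠ []) : preHead [] fs = fs := by
  cases fs with
  | nil => exact absurd rfl h
  | cons f fs => simp [preHead]

theorem preHead_preHead (p q : List Char) (fs : List (List Char)) :
    preHead p (preHead q fs) = preHead (p ++ q) fs := by
  cases fs <;> simp [preHead]

theorem go_spec (fuel : Nat) : ∀ (l cur : List Char) (acc : List (List Char)),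
    l.length ≤ fuel →
    PySem.Chars.splitOn.go [';'] fuel l cur acc = acc.reverse ++ preHead cur.reverse (frags l) := by
  induction fuel with
  | zero =>
    intro l cur acc h
    have hl : l = [] := by cases l with
      | nil => rfl
      | cons c r => simp at h
    subst hl
    simp [PySem.Chars.splitOn.go, frags, preHead]
  | succ n ih =>
    intro l cur acc h
    cases l with
    | nil => simp [PySem.Chars.splitOn.go, frags, preHead]
    | cons c rest =>
      by_cases hc : c = ';'
      · subst hc
        have hpre : List.isPrefixOf [';'] (';' :: rest) = true := by
          simp [List.isPrefixOf]
        simp only [PySem.Chars.splitOn.go, hpre, if_pos]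
        have hdrop : List.drop [';'].length (';' :: rest) = rest := by simp
        rw [hdrop]
        rw [ih rest [] (cur.reverse :: acc) (by simpa using Nat.le_of_succ_le_succ h)]
        simp only [List.reverse_nil]
        rw [preHead_nil _ (frags_ne_nil rest)]
        have : frags (';' :: rest) = [] :: frags rest := by simp [frags]
        rw [this]
        cases hfr : frags rest with
        | nil => exact absurd hfr (frags_ne_nil rest)
        | cons f fs => simp [preHead]
      · have hpre : List.isPrefixOf [';'] (c :: rest) = false := by
          simp [List.isPrefixOf]
          exact fun hh => absurd hh.symm hc
        simp only [PySem.Chars.splitOn.go, hpre]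
        rw [if_neg (by simp)]
        rw [ih rest (c :: cur) acc (by simpa using Nat.le_of_succ_le_succ h)]
        have : frags (c :: rest) = preHead [c] (frags rest) := by simp [frags, hc]
        rw [this, preHead_preHead]
        simp
  
theorem splitOn_eq_frags (cs : List Char) : PySem.Chars.splitOn cs [';'] = frags cs := by
  unfold PySem.Chars.splitOn
  rw [go_spec (cs.length + 1) cs [] [] (by omega)]
  simp [preHead_nil _ (frags_ne_nil cs)]

/-- running max of fragment lengths -/
def Nmax (a : Int) (fs : List (List Char)) : Int :=
  fs.foldl (fun m f => max m ((f.length : Int))) a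

theorem Nmax_max (fs : List (List Char)) : ∀ (x y : Int),
    Nmax (max x y) fs = max x (Nmax y fs) := by
  induction fs with
  | nil => intro x y; simp [Nmax]
  | cons f fs ih =>
    intro x y
    simp only [Nmax, List.foldl_cons]
    rw [max_assoc]
    exact ih x (max y (f.length : Int))

theorem Nmax_ge (fs : List (List Char)) : ∀ (a : Int), a ≤ Nmax a fs := by
  induction fs with
  | nil => intro a; simp [Nmax]
  | cons f fs ih =>
    intro a
    simp only [Nmax, List.foldl_cons]
    exact le_trans (le_max_left _ _) (ih _)

theorem fold_add1 (t : List (List Char)) : ∀ (a : Int),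
    t.foldl (fun m f => max m ((f.length : Int) + 1)) (a + 1) = Nmax a t + 1 := by
  induction t with
  | nil => intro a; simp [Nmax]
  | cons f fs ih =>
    intro a
    simp only [List.foldl_cons, Nmax]
    have : max (a + 1) ((f.length : Int) + 1) = max a (f.length : Int) + 1 := by omega
    rw [this, ih]
    rfl

theorem stepA_eq :
    (fun (m : Int) (fragmento : List Char) =>
      let fragmento := fragmento ++ [';']
      if ((fragmento.length : Int)) > m then ((fragmento.length : Int)) else m)
    = fun (m : Int) f => max m ((f.length : Int) + 1) := by
  funext m f
  simp only [List.length_append, List.length_cons, List.length_nil]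
  push_cast
  split_ifs <;> omega

theorem Bgen (cs : List Char) : ∀ (b c : Int) (f : List Char) (fs : List (List Char)),
    frags cs = f :: fs →
    max (cs.foldl (fun (p : Int × Int) c => if c = ';' then (max p.1 p.2, 0) else (p.1, p.2 + 1)) (b, c)).1
        (cs.foldl (fun (p : Int × Int) c => if c = ';' then (max p.1 p.2, 0) else (p.1, p.2 + 1)) (b, c)).2
      = max b (Nmax (c + (f.length : Int)) fs) := by
  induction cs with
  | nil =>
    intro b c f fs h
    simp [frags] at h
    obtain ⟨hf, hfs⟩ := h
    subst hf; subst hfs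
    simp [Nmax]
  | cons ch r ih =>
    intro b c f fs h
    by_cases hch : ch = ';'
    · subst hch
      simp only [frags] at h
      rw [if_pos trivial] at h
      injection h with hf hfs
      subst hf; subst hfs
      obtain ⟨f', fs', hfr⟩ : ∃ f' fs', frags r = f' :: fs' := by
        cases hx : frags r with
        | nil => exact absurd hx (frags_ne_nil r)
        | cons a l => exact ⟨a, l, rfl⟩
      simp only [List.foldl_cons]
      rw [if_pos trivial]
      rw [ih (max b c) 0 f' fs' hfr, hfr]
      have h0 : (0 : Int) + ((f'.length : Int)) = (f'.length : Int) := by ring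
      rw [h0]
      have h1 : c + ((([] : List Char).length : Int)) = c := by simp
      rw [h1]
      have h2 : Nmax c (f' :: fs') = Nmax (max c ((f'.length : Int))) fs' := by
        simp [Nmax]
      rw [h2, Nmax_max fs' c, ← max_assoc]
    · obtain ⟨f', fs', hfr⟩ : ∃ f' fs', frags r = f' :: fs' := by
        cases hx : frags r with
        | nil => exact absurd hx (frags_ne_nil r)
        | cons a l => exact ⟨a, l, rfl⟩
      have hfrags : frags (ch :: r) = (ch :: f') :: fs' := by
        simp [frags, hch, hfr, preHead]
      rw [hfrags] at h
      injection h with hf hfs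
      subst hf; subst hfs
      simp only [List.foldl_cons, if_neg hch]
      rw [ih b (c + 1) f' fs' hfr]
      congr 2
      simp only [List.length_cons]
      push_cast
      ring

-- ===== VERDICT (by name: the statement is the Claim_ definition above) =====
theorem caclular_fragmento_mas_largo2_spec : Claim_equal_caclular_fragmento_mas_largo2 := by
  intro texto _hdom
  unfold Spec_caclular_fragmento_mas_largo2
  unfold caclular_fragmento_mas_largo2 caclular_fragmento_mas_largo2_alt
  simp only []
  set cs := texto.toList with hcs
  obtain ⟨h, t, hfr⟩ : ∃ h t, frags cs = h :: t := by
    cases hx : frags cs with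
    | nil => exact absurd hx (frags_ne_nil cs)
    | cons a l => exact ⟨a, l, rfl⟩
  rw [splitOn_eq_frags, hfr]
  have hget : (PySem.List.pyGet? (h :: t) (0 : Int)).getD [] = h := by
    simp [PySem.List.pyGet?, PySem.List.pyIdx?]
  rw [hget]
  rw [stepA_eq]
  simp only [List.foldl_cons]
  have hinit : max ((h.length : Int)) ((h.length : Int) + 1) = (h.length : Int) + 1 := by omega
  rw [hinit, fold_add1]
  rw [Bgen cs 0 0 h t hfr]
  have : (0 : Int) + (h.length : Int) = (h.length : Int) := by ring
  rw [this]
  have hge : (0 : Int) ≤ Nmax ((h.length : Int)) t :=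
    le_trans (by positivity) (Nmax_ge t _)
  rw [max_eq_right hge]
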